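-- pv_equiv track=rewrite | github.com/CarlaMenegat/VarelaDigital | transformations/python/generate_ontology_tbox.py | pretty_label_from_local
-- ===== SOURCE A (Python) =====
-- from typing import Dict, List, Optional, Set, Tuple
--
-- def pretty_label_from_local(local: str) -> str:
--     # snake_case -> words
--     if "_" in local:
--         return local.replace("_", " ").strip()
--     # camelCase -> camel Case
--     out: List[str] = []
--     prev_lower = False
--     for ch in local:
--         if prev_lower and ch.isupper():
--             out.append(" ")
--         out.append(ch)
--         prev_lower = ch.islower()
--     return "".join(out).strip()
-- ===== SOURCE B (Python) =====
-- def _split_camel(s: str) -> list: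
--     # find the first lowercase->uppercase boundary; split the word off and recurse on the rest
--     for i in range(1, len(s)):
--         if s[i - 1].islower() and s[i].isupper():
--             return [s[:i]] + _split_camel(s[i:])
--     return [s]
--
-- def pretty_label_from_local(local: str) -> str:
--     # snake_case -> words
--     if "_" in local:
--         return local.replace("_", " ").strip()
--     # camelCase: segment into maximal words at lower->upper boundaries, then join
--     return " ".join(_split_camel(local)).strip()
-- ===== Notes on version B (the rewrite author's own statement) =====
-- stated objective: alternative
-- what changed: The camelCase branch's single stateful character loop (prev_lower flag, appending chars and spaces to one accumulator) is replaced by recursive segmentation: find the first lowercase-to-uppercase boundary, split that word off, recurse on the remainder, and join the resulting word list with single spaces.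
import Mathlib
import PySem

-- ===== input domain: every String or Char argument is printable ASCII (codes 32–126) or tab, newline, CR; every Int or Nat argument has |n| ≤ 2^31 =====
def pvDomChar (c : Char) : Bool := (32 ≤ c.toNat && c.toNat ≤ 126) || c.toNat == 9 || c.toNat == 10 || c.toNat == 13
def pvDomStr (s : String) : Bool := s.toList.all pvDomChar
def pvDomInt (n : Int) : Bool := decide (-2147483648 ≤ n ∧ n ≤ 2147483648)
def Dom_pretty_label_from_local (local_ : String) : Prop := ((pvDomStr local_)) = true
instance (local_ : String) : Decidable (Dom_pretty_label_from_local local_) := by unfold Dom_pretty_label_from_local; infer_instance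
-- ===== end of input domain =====

-- B replaces A's stateful prev_lower character loop by recursive segmentation: split the word before the
-- first lower->upper boundary off, recurse on the rest, and " ".join the words (alternative; same cost).


-- ===== PORT A =====
def pretty_label_from_local (local_ : String) : String :=
  if PySem.Str.isIn "_" local_ then
    PySem.Str.strip (PySem.Str.replace local_ "_" " ")
  else
    -- out: list of one-char strings, prev_lower flag; "".join(out).strip()
    let r := local_.toList.foldl
      (fun (st : List (List Char) × Bool) ch =>
        ((if st.2 && PySem.Chars.isupper ch then st.1 ++ [[' ']] else st.1) ++ [[ch]],
          PySem.Chars.islower ch))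
      ([], false)
    String.ofList (PySem.Chars.strip (PySem.Chars.join [] r.1))

-- ===== PORT B =====
-- B's `for i in range(1, len(s))` scan: walk the index list, return the first boundary index
-- (none = the loop fell through). s[i-1] / s[i] are always in range here, so getD is exact.
def pvFindBLoop (s : List Char) : List Nat → Option Nat
  | [] => none
  | i :: rest =>
      if PySem.Chars.islower (s.getD (i - 1) ' ') && PySem.Chars.isupper (s.getD i ' ') then some i
      else pvFindBLoop s rest

def pvFindB (s : List Char) : Option Nat := pvFindBLoop s (List.range' 1 (s.length - 1))

-- B's _split_camel: split the word before the first boundary off and recurse on the rest.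
-- The recursion consumes at least one character per step, so fuel = len(s) suffices (a totality guard).
def pvSplitGo : Nat → List Char → List (List Char)
  | 0, s => [s]
  | n + 1, s =>
      match pvFindB s with
      | some i => s.take i :: pvSplitGo n (s.drop i)
      | none => [s]

def pvSplitCamel (s : List Char) : List (List Char) := pvSplitGo s.length s

def pretty_label_from_local_alt (local_ : String) : String :=
  if PySem.Str.isIn "_" local_ then
    PySem.Str.strip (PySem.Str.replace local_ "_" " ")
  else
    -- " ".join(_split_camel(local)).strip()
    String.ofList (PySem.Chars.strip (PySem.Chars.join [' '] (pvSplitCamel local_.toList)))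

-- ===== PRECONDITION & SPEC =====
def Spec_pretty_label_from_local (local_ : String) (out : String) : Prop := out = pretty_label_from_local_alt local_
instance (local_ : String) (out : String) : Decidable (Spec_pretty_label_from_local local_ out) := by unfold Spec_pretty_label_from_local; infer_instance

-- ===== CLAIM (what is proved, stated in full; the proofs are below) =====
def Claim_equal_pretty_label_from_local : Prop := ∀ (local_ : String), Dom_pretty_label_from_local local_ → Spec_pretty_label_from_local local_ (pretty_label_from_local local_)

-- ===== LEMMAS AND PROOFS =====

/-- Reference form of A's camelCase pass: space before `c` iff `prev` and `c` upper. -/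
def pvCamel : Bool → List Char → List Char
  | _, [] => []
  | prev, c :: r =>
      (if prev && PySem.Chars.isupper c then [' '] else []) ++ c :: pvCamel (PySem.Chars.islower c) r

/-- Reference word-splitter: structural-recursive form of `pvSplitCamel` on a nonempty list. -/
def pvW (c : Char) : List Char → List (List Char)
  | [] => [[c]]
  | b :: t =>
      if PySem.Chars.islower c && PySem.Chars.isupper b then [c] :: pvW b t
      else (c :: (pvW b t).headD []) :: (pvW b t).tail

lemma pv_intercalate_nil (ps : List (List Char)) :
    List.intercalate [] ps = ps.flatten := by
  induction ps with
  | nil => rfl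
  | cons a t ih =>
    cases t with
    | nil => simp [List.intercalate]
    | cons b t' =>
      simp only [List.intercalate] at ih ⊢
      simp_all [List.intersperse]

lemma pv_join_nil_flatten (ps : List (List Char)) :
    PySem.Chars.join [] ps = ps.flatten := by
  simpa [PySem.Chars.join] using pv_intercalate_nil ps

lemma pv_foldA (cs : List Char) : ∀ (acc : List (List Char)) (prev : Bool),
    (cs.foldl
      (fun (st : List (List Char) × Bool) ch =>
        ((if st.2 && PySem.Chars.isupper ch then st.1 ++ [[' ']] else st.1) ++ [[ch]],
          PySem.Chars.islower ch))
      (acc, prev)).1.flatten = acc.flatten ++ pvCamel prev cs := by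
  induction cs with
  | nil => intro acc prev; simp [pvCamel]
  | cons c r ih =>
    intro acc prev
    simp only [List.foldl_cons, pvCamel]
    rw [ih]
    by_cases h : prev && PySem.Chars.isupper c <;> simp [h]

lemma pvW_ne_nil (c : Char) (r : List Char) : pvW c r ≠ [] := by
  cases r with
  | nil => simp [pvW]
  | cons b t => simp only [pvW]; split <;> simp

lemma pvW_shape (c : Char) (r : List Char) : ∃ w ws, pvW c r = w :: ws := by
  cases hb : pvW c r with
  | nil => exact absurd hb (pvW_ne_nil c r)
  | cons w ws => exact ⟨w, ws, rfl⟩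

lemma pv_ic_cons (x y : List Char) (ys : List (List Char)) :
    List.intercalate [' '] (x :: y :: ys) = x ++ ' ' :: List.intercalate [' '] (y :: ys) := by
  simp [List.intercalate, List.intersperse]

lemma pv_ic_head (c : Char) (w : List Char) (ws : List (List Char)) :
    List.intercalate [' '] ((c :: w) :: ws) = c :: List.intercalate [' '] (w :: ws) := by
  cases ws with
  | nil => simp [List.intercalate]
  | cons y t => rw [pv_ic_cons, pv_ic_cons]; simp

lemma pvW_join : ∀ (r : List Char) (c : Char),
    List.intercalate [' '] (pvW c r) = c :: pvCamel (PySem.Chars.islower c) r := by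
  intro r
  induction r with
  | nil => intro c; simp [pvW, pvCamel, List.intercalate]
  | cons b t ih =>
    intro c
    simp only [pvW, pvCamel]
    obtain ⟨w, ws, hw⟩ := pvW_shape b t
    by_cases h : PySem.Chars.islower c && PySem.Chars.isupper b
    · rw [if_pos h, if_pos h, hw, pv_ic_cons, ← hw, ih b]
      simp
    · rw [if_neg h, if_neg h, hw]
      simp only [List.headD, List.tail]
      rw [pv_ic_head, ← hw, ih b]
      simp

lemma pv_mem_range' : ∀ (n s m : Nat), m ∈ List.range' s n → s ≤ m ∧ m < s + n := by
  intro n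
  induction n with
  | zero => intro s m h; simp [List.range'] at h
  | succ n ih =>
    intro s m h
    rw [show List.range' s (n + 1) = s :: List.range' (s + 1) n from rfl] at h
    rcases List.mem_cons.mp h with h | h
    · omega
    · have := ih (s + 1) m h; omega

lemma pv_loop_mem (s : List Char) : ∀ (l : List Nat) (k : Nat),
    pvFindBLoop s l = some k → k ∈ l := by
  intro l
  induction l with
  | nil => intro k h; cases h
  | cons i rest ih =>
    intro k h
    simp only [pvFindBLoop] at h
    split at h
    · cases h; exact List.mem_cons_self
    · exact List.mem_cons_of_mem _ (ih k h)

lemma pvFindB_bounds (s : List Char) (k : Nat) (h : pvFindB s = some k) :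
    1 ≤ k ∧ k < s.length := by
  have h1 := pv_loop_mem s _ k h
  have h2 := pv_mem_range' (s.length - 1) 1 k h1
  omega

lemma pv_shiftLoop (s : List Char) (c : Char) : ∀ (l : List Nat), (∀ i ∈ l, 1 ≤ i) →
    pvFindBLoop (c :: s) (l.map (· + 1)) = (pvFindBLoop s l).map (· + 1) := by
  intro l
  induction l with
  | nil => intro _; rfl
  | cons i rest ih =>
    intro hl
    simp only [List.map_cons, pvFindBLoop]
    have hi : 1 ≤ i := hl i (by simp)
    have hg1 : (c :: s).getD (i + 1 - 1) ' ' = s.getD (i - 1) ' ' := by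
      obtain ⟨j, rfl⟩ : ∃ j, i = j + 1 := ⟨i - 1, by omega⟩
      simp
    have hg2 : (c :: s).getD (i + 1) ' ' = s.getD i ' ' := by simp
    rw [hg1, hg2]
    split
    · rfl
    · exact ih (fun j hj => hl j (List.mem_cons_of_mem _ hj))

lemma pv_range'_map : ∀ (n s : Nat), (List.range' s n).map (· + 1) = List.range' (s + 1) n := by
  intro n
  induction n with
  | zero => intro s; rfl
  | succ n ih =>
    intro s
    rw [show List.range' s (n + 1) = s :: List.range' (s + 1) n from rfl,
        show List.range' (s + 1) (n + 1) = (s + 1) :: List.range' (s + 2) n from rfl,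
        List.map_cons, ih (s + 1)]

lemma pvFindB_cons_cons (c b : Char) (t : List Char) :
    pvFindB (c :: b :: t) =
      if PySem.Chars.islower c && PySem.Chars.isupper b then some 1
      else (pvFindB (b :: t)).map (· + 1) := by
  unfold pvFindB
  simp only [List.length_cons]
  rw [show t.length + 1 + 1 - 1 = t.length + 1 by omega,
      show t.length + 1 - 1 = t.length by omega,
      show List.range' 1 (t.length + 1) = 1 :: List.range' 2 t.length from rfl]
  simp only [pvFindBLoop, List.getD_cons_succ, List.getD_cons_zero, Nat.sub_self]
  rw [← pv_range'_map t.length 1,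
      pv_shiftLoop (b :: t) c (List.range' 1 t.length)
        (fun i hi => (pv_mem_range' t.length 1 i hi).1)]

lemma pvSplitGo_eq_W : ∀ (N : Nat) (r : List Char) (c : Char) (n : Nat),
    r.length ≤ N → r.length + 1 ≤ n → pvSplitGo n (c :: r) = pvW c r := by
  intro N
  induction N with
  | zero =>
    intro r c n hr hn
    interval_cases hr' : r.length
    · obtain rfl : r = [] := List.length_eq_zero_iff.mp hr'
      obtain ⟨m, rfl⟩ : ∃ m, n = m + 1 := ⟨n - 1, by omega⟩
      simp [pvSplitGo, pvFindB, pvFindBLoop, pvW]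
  | succ N ih =>
    intro r c n hr hn
    cases r with
    | nil =>
      obtain ⟨m, rfl⟩ : ∃ m, n = m + 1 := ⟨n - 1, by omega⟩
      simp [pvSplitGo, pvFindB, pvFindBLoop, pvW]
    | cons b t =>
      obtain ⟨m, rfl⟩ : ∃ m, n = m + 1 := ⟨n - 1, by omega⟩
      simp only [List.length_cons] at hr hn
      by_cases hb : PySem.Chars.islower c && PySem.Chars.isupper b
      · have hf : pvFindB (c :: b :: t) = some 1 := by
          rw [pvFindB_cons_cons, if_pos hb]
        simp only [pvSplitGo, hf, List.take_succ_cons, List.take_zero,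
          List.drop_succ_cons, List.drop_zero]
        rw [ih t b m (by omega) (by omega), pvW, if_pos hb]
      · cases hk : pvFindB (b :: t) with
        | none =>
          have hf : pvFindB (c :: b :: t) = none := by
            rw [pvFindB_cons_cons, if_neg hb, hk]; rfl
          have hw : pvW b t = [b :: t] := by
            rw [← ih t b (t.length + 1) (by omega) (by omega)]
            simp only [pvSplitGo, hk]
          simp only [pvSplitGo, hf, pvW, if_neg hb, hw]
          rfl
        | some k =>
          have hbk := pvFindB_bounds _ _ hk
          simp only [List.length_cons] at hbk
          have hf : pvFindB (c :: b :: t) = some (k + 1) := by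
            rw [pvFindB_cons_cons, if_neg hb, hk]; rfl
          -- the rest after the first word is nonempty
          have hdne : List.drop k (b :: t) ≠ [] := by
            intro hnil
            have := congrArg List.length hnil
            simp at this; omega
          obtain ⟨d, ds, hd⟩ := List.exists_cons_of_ne_nil hdne
          have hlds : ds.length + 1 = t.length + 1 - k := by
            have := congrArg List.length hd
            simp at this; omega
          have hw : pvW b t = List.take k (b :: t) :: pvW d ds := by
            rw [← ih t b (t.length + 1) (by omega) (by omega)]
            simp only [pvSplitGo, hk]
            rw [hd, ih ds d t.length (by omega) (by omega)]
          simp only [pvSplitGo, hf, List.take_succ_cons, List.drop_succ_cons]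
          rw [hd, ih ds d m (by omega) (by omega), pvW, if_neg hb, hw]
          simp only [List.headD, List.tail]
lemma pvSplit_eq_W (r : List Char) (c : Char) : pvSplitCamel (c :: r) = pvW c r := by
  unfold pvSplitCamel
  exact pvSplitGo_eq_W r.length r c (c :: r).length le_rfl (by simp)

-- ===== VERDICT (by name: the statement is the Claim_ definition above) =====
theorem pretty_label_from_local_spec : Claim_equal_pretty_label_from_local := by
  intro s _
  unfold Spec_pretty_label_from_local pretty_label_from_local pretty_label_from_local_alt
  split_ifs with h
  · rfl
  · dsimp only
    congr 1
    congr 1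
    rw [pv_join_nil_flatten, pv_foldA]
    cases hc : s.toList with
    | nil =>
      simp [pvSplitCamel, pvSplitGo, pvCamel, PySem.Chars.join, List.intercalate]
    | cons a r =>
      rw [pvSplit_eq_W r a]
      have hj : PySem.Chars.join [' '] (pvW a r) = List.intercalate [' '] (pvW a r) := by
        simp [PySem.Chars.join]
      rw [hj, pvW_join r a]
      simp [pvCamel]
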